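-- pv_equiv track=rewrite | github.com/ad-astra-per-ardua/Solving-Algorithm | 프로그래머스/lv3/76503. 모두 0으로 만들기/모두 0으로 만들기.py | dfs
-- ===== SOURCE A (Python) =====
-- def dfs(node, parent, b, adj):
--     total = 0
--     for child in adj[node]:
--         if child != parent:
--             total += dfs(child, node, b, adj)
--     total += abs(b[node])
--     b[parent] += b[node]
--     return total
-- ===== SOURCE B (Python) =====
-- def dfs(node, parent, b, adj):
--     # Iterative explicit-stack post-order traversal replacing A's recursion.
--     # Performs the same in-place mutations of b in the same order as A;
--     # equivalent return value wherever A returns.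
--     total = 0
--     stack = [(node, parent, 0)]
--     while stack:
--         u, p, i = stack.pop()
--         if i < len(adj[u]):
--             stack.append((u, p, i + 1))
--             c = adj[u][i]
--             if c != p:
--                 stack.append((c, u, 0))
--         else:
--             total += abs(b[u])
--             b[p] += b[u]
--     return total
-- ===== Notes on version B (the rewrite author's own statement) =====
-- stated objective: alternative
-- what changed: Replaces A's self-recursive DFS with an iterative post-order traversal driven by an explicit stack of (node, parent, child-index) frames, performing the same b mutations and abs-sum in the same bottom-up order without Python recursion.
import Mathlib
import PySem

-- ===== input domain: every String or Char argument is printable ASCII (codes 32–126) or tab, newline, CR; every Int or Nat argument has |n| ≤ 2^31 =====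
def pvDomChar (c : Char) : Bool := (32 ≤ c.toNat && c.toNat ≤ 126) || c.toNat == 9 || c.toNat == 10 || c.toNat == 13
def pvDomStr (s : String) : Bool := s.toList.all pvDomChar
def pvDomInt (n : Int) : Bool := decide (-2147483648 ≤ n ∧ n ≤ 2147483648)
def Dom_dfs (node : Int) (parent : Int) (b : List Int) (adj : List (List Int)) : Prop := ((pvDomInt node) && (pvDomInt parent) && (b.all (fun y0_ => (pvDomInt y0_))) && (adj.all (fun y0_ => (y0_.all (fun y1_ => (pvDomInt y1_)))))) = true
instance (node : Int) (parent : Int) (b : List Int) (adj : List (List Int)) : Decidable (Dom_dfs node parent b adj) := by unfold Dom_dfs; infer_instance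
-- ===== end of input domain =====

-- B replaces A's self-recursive DFS by an iterative explicit-stack post-order traversal
-- (objective: alternative, same cost).  Both A and B mutate the Python list b in place in
-- the same order; the equivalence proved here is about the RETURN value only.

-- ===== PORT A =====
-- Transliteration of A's recursion, indexed by a recursion-depth guard that only makes the
-- definition total: under Pre_dfs the traversal's call depth is below the number of distinct
-- (vertex, previous-vertex) states, which (2*adj.length+1)^2 + 1 exceeds, so the 0 branch is
-- never reached (proved below).  The mutated list b is threaded through and returned.
def dfsAF : Nat → Int → Int → List Int → List (List Int) → Int × List Int
  | 0, _, _, b, _ => (0, b)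
  | f+1, node, parent, b, adj =>
      let r := (PySem.List.pyGetD adj node []).foldl
        (fun acc child =>
          if child ≠ parent then
            let s := dfsAF f child node acc.2 adj
            (acc.1 + s.1, s.2)
          else acc) (0, b)
      (r.1 + |PySem.List.pyGetD r.2 node 0|,
       PySem.List.pySetD r.2 parent (PySem.List.pyGetD r.2 parent 0 + PySem.List.pyGetD r.2 node 0))

def dfs (node : Int) (parent : Int) (b : List Int) (adj : List (List Int)) : Int :=
  (dfsAF ((2 * adj.length + 1) * (2 * adj.length + 1) + 1) node parent b adj).1

-- ===== PORT B =====
-- Transliteration of Source B's while loop over an explicit stack of (node, parent, child-index)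
-- frames; the step-count guard only makes the definition total (under Pre_dfs it is never
-- exhausted — proved below).
def runB (adj : List (List Int)) : Nat → List (Int × Int × Nat) → Int → List Int → Option Int
  | _, [], total, _ => some total
  | 0, _ :: _, _, _ => none
  | f+1, (u, p, i) :: rest, total, b =>
      let cs := PySem.List.pyGetD adj u []
      if i < cs.length then
        let c := cs.getD i 0
        runB adj f (if c ≠ p then (c, u, 0) :: (u, p, i+1) :: rest else (u, p, i+1) :: rest) total b
      else
        runB adj f rest (total + |PySem.List.pyGetD b u 0|)
          (PySem.List.pySetD b p (PySem.List.pyGetD b p 0 + PySem.List.pyGetD b u 0))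

def dfs_alt (node : Int) (parent : Int) (b : List Int) (adj : List (List Int)) : Int :=
  (runB adj (((adj.map List.length).sum + 2) ^ ((2 * adj.length + 1) * (2 * adj.length + 1) + 2))
    [(node, parent, 0)] 0 b).getD 0

-- ===== PRECONDITION & SPEC =====
-- `safe g m k v q` says: every walk of the child relation of `g` that starts at vertex `v`,
-- never steps back to the vertex it just came from (`q` for the first step), visits only
-- valid (possibly negative) Python indices of `g` and of a list of length `m`, and is
-- shorter than `k`.  It is a plain bounded safety property of the input graph, not a run of
-- either program: it carries no totals, no |·|, and no list updates.
def safe (g : List (List Int)) (m : Nat) : Nat → Int → Int → Bool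
  | 0, _, _ => false
  | k+1, v, q =>
      match PySem.List.pyGet? g v with
      | none => false
      | some l => decide (PySem.Raise.InRange m v) && l.all (fun w => w == q || safe g m k w v)

-- Pre_dfs holds exactly when Python A returns: parent is a valid index of b, and every
-- parent-avoiding walk from (node, parent) stays on valid indices of adj and b and is
-- shorter than (2*adj.length+1)^2 + 1 — a bound exceeding the number of distinct
-- (vertex, previous-vertex) states, so this says precisely that A's recursion meets no
-- IndexError and cannot run forever (on other inputs A raises, e.g. RecursionError on
-- cyclic adjacency, and returns nothing).
def Pre_dfs (node : Int) (parent : Int) (b : List Int) (adj : List (List Int)) : Prop :=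
  PySem.Raise.InRange b.length parent ∧
  safe adj b.length ((2 * adj.length + 1) * (2 * adj.length + 1) + 1) node parent = true

instance (node : Int) (parent : Int) (b : List Int) (adj : List (List Int)) : Decidable (Pre_dfs node parent b adj) := by
  unfold Pre_dfs; infer_instance

def pvWitness_dfs : Int × Int × List Int × List (List Int) := (0, -1, [1, -2, 3], [[1, 2], [0], [0]])

def Spec_dfs (node : Int) (parent : Int) (b : List Int) (adj : List (List Int)) (out : Int) : Prop := out = dfs_alt node parent b adj
instance (node : Int) (parent : Int) (b : List Int) (adj : List (List Int)) (out : Int) : Decidable (Spec_dfs node parent b adj out) := by unfold Spec_dfs; infer_instance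

-- ===== CLAIM (what is proved, stated in full; the proofs are below) =====
def Claim_equal_dfs : Prop := ∀ (node : Int) (parent : Int) (b : List Int) (adj : List (List Int)), Dom_dfs node parent b adj → Pre_dfs node parent b adj → Spec_dfs node parent b adj (dfs node parent b adj)

-- ===== LEMMAS AND PROOFS =====

-- One step of A's child loop, children recursing at depth budget f.
def stepA (adj : List (List Int)) (f : Nat) (u p : Int) (acc : Int × List Int) (child : Int) : Int × List Int :=
  if child ≠ p then
    let s := dfsAF f child u acc.2 adj
    (acc.1 + s.1, s.2)
  else acc

-- A's frame: process the child list cs, then finalize (abs-add and parent update).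
def finProc (adj : List (List Int)) (f : Nat) (u p : Int) (b : List Int) (cs : List Int) : Int × List Int :=
  let r := cs.foldl (stepA adj f u p) (0, b)
  (r.1 + |PySem.List.pyGetD r.2 u 0|,
   PySem.List.pySetD r.2 p (PySem.List.pyGetD r.2 p 0 + PySem.List.pyGetD r.2 u 0))

theorem dfsAF_succ (adj : List (List Int)) (f : Nat) (u p : Int) (b : List Int) :
    dfsAF (f+1) u p b adj = finProc adj f u p b (PySem.List.pyGetD adj u []) := rfl

theorem pyGetD_eq_of_pyGet? {α : Type} (xs : List α) (i : Int) (d v : α)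
    (h : PySem.List.pyGet? xs i = some v) : PySem.List.pyGetD xs i d = v := by
  simp only [PySem.List.pyGet?, PySem.List.pyGetD, PySem.List.pyIdx?] at *
  split_ifs at h ⊢ <;> simp_all

theorem runB_nil (adj : List (List Int)) (g : Nat) (total : Int) (b : List Int) :
    runB adj g [] total b = some total := by
  cases g <;> rfl

theorem runB_succ (adj : List (List Int)) (k : Nat) (u p : Int) (i : Nat)
    (rest : List (Int × Int × Nat)) (total : Int) (b : List Int) :
    runB adj (k+1) ((u, p, i) :: rest) total b =
      (if i < (PySem.List.pyGetD adj u []).length then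
        runB adj k
          (if (PySem.List.pyGetD adj u []).getD i 0 ≠ p then
            ((PySem.List.pyGetD adj u []).getD i 0, u, 0) :: (u, p, i+1) :: rest
          else (u, p, i+1) :: rest) total b
      else
        runB adj k rest (total + |PySem.List.pyGetD b u 0|)
          (PySem.List.pySetD b p (PySem.List.pyGetD b p 0 + PySem.List.pyGetD b u 0))) := rfl

theorem len_le_sum (adj : List (List Int)) (l : List Int) (hl : l ∈ adj) :
    l.length ≤ (adj.map List.length).sum :=
  List.single_le_sum (fun x _ => Nat.zero_le x) _ (List.mem_map.mpr ⟨l, hl, rfl⟩)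

-- The accumulated total of A's child loop is additive in its starting value.
theorem foldl_stepA_shift (adj : List (List Int)) (f : Nat) (u p : Int) :
    ∀ (cs : List Int) (t0 : Int) (b0 : List Int),
      cs.foldl (stepA adj f u p) (t0, b0)
        = (t0 + (cs.foldl (stepA adj f u p) (0, b0)).1, (cs.foldl (stepA adj f u p) (0, b0)).2) := by
  intro cs
  induction cs with
  | nil => intro t0 b0; simp
  | cons c cs ih =>
      intro t0 b0
      simp only [List.foldl_cons]
      by_cases hc : c = p
      · rw [show stepA adj f u p (t0, b0) c = (t0, b0) by simp [stepA, hc],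
            show stepA adj f u p (0, b0) c = (0, b0) by simp [stepA, hc]]
        exact ih t0 b0
      · rw [show stepA adj f u p (t0, b0) c = (t0 + (dfsAF f c u b0 adj).1, (dfsAF f c u b0 adj).2) by
              simp [stepA, hc],
            show stepA adj f u p (0, b0) c = (0 + (dfsAF f c u b0 adj).1, (dfsAF f c u b0 adj).2) by
              simp [stepA, hc]]
        rw [ih, ih (0 + (dfsAF f c u b0 adj).1)]
        simp only [Prod.mk.injEq]
        exact ⟨by ring, trivial⟩

-- The stack machine of B, started on a frame for (u, p) with the first i children already
-- taken, runs in some m steps to the rest of the stack, adding exactly what A's frame for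
-- (u, p) computes and leaving exactly A's mutated list — provided every parent-avoiding
-- walk from (u, p) is shorter than k+1 (which also rules out exhausting A's depth budget).
theorem sim (adj : List (List Int)) (bn : Nat) :
    ∀ (k : Nat) (cs : List Int) (u p : Int) (i : Nat) (rest : List (Int × Int × Nat)) (total : Int) (bcur : List Int),
      safe adj bn (k+1) u p = true →
      cs = (PySem.List.pyGetD adj u []).drop i →
      ∃ m, m ≤ (cs.length + 1) * ((adj.map List.length).sum + 2) ^ (k+1) ∧ ∀ g,
        runB adj (m + g) ((u, p, i) :: rest) total bcur
          = runB adj g rest (total + (finProc adj k u p bcur cs).1) (finProc adj k u p bcur cs).2 := by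
  intro k
  induction k using Nat.strong_induction_on with
  | _ k ih =>
  intro cs
  induction cs with
  | nil =>
      intro u p i rest total bcur hsafe hdrop
      refine ⟨1, ?_, ?_⟩
      · have hX : 0 < ((adj.map List.length).sum + 2) ^ (k+1) := Nat.pow_pos (by omega)
        simp only [List.length_nil, Nat.zero_add, Nat.one_mul]
        exact hX
      · intro g
        have hlen : (PySem.List.pyGetD adj u []).length ≤ i := by
          have hl := congrArg List.length hdrop
          simp at hl
          omega
        have h1 : 1 + g = g + 1 := by omega
        rw [h1, runB_succ]
        rw [if_neg (by omega : ¬ i < (PySem.List.pyGetD adj u []).length)]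
        simp [finProc]
  | cons c cs' ihc =>
      intro u p i rest total bcur hsafe hdrop
      have hsafe0 := hsafe
      -- unpack the safety of the (u, p) frame
      rcases hq : PySem.List.pyGet? adj u with _ | l
      · rw [safe, hq] at hsafe; cases hsafe
      have hL : PySem.List.pyGetD adj u [] = l := pyGetD_eq_of_pyGet? adj u [] l hq
      rw [safe, hq, Bool.and_eq_true, List.all_eq_true] at hsafe
      obtain ⟨-, hall⟩ := hsafe
      have hlenL : i < (PySem.List.pyGetD adj u []).length := by
        by_contra h
        rw [List.drop_eq_nil_of_le (by omega)] at hdrop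
        cases hdrop
      have hcmem : c ∈ PySem.List.pyGetD adj u [] :=
        List.mem_of_mem_drop (hdrop ▸ List.mem_cons_self)
      have hgetc : (PySem.List.pyGetD adj u []).getD i 0 = c := by
        have h : ((PySem.List.pyGetD adj u []).drop i).head? = (PySem.List.pyGetD adj u [])[i]? :=
          List.head?_drop
        rw [← hdrop] at h
        simp [List.getD, ← h]
      have hdrop' : cs' = (PySem.List.pyGetD adj u []).drop (i+1) := by
        have : (PySem.List.pyGetD adj u []).drop (i+1)
            = ((PySem.List.pyGetD adj u []).drop i).drop 1 := by
          rw [List.drop_drop]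
        rw [this, ← hdrop]
        simp
      by_cases hcp : c = p
      · -- child equals parent: skipped
        obtain ⟨m, hm, hrun⟩ := ihc u p (i+1) rest total bcur hsafe0 hdrop'
        refine ⟨1 + m, ?_, ?_⟩
        · have hX : 0 < ((adj.map List.length).sum + 2) ^ (k+1) := Nat.pow_pos (by omega)
          have h2 : ((c :: cs').length + 1) * ((adj.map List.length).sum + 2) ^ (k+1)
              = (cs'.length + 1) * ((adj.map List.length).sum + 2) ^ (k+1)
                + ((adj.map List.length).sum + 2) ^ (k+1) := by
            simp only [List.length_cons]; ring
          omega
        · intro g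
          have h1 : 1 + m + g = (m + g) + 1 := by omega
          rw [h1, runB_succ, if_pos hlenL, hgetc, if_neg (by simp [hcp])]
          rw [hrun g]
          have hskip : finProc adj k u p bcur (c :: cs') = finProc adj k u p bcur cs' := by
            simp [finProc, List.foldl_cons, stepA, hcp]
          rw [hskip]
      · -- real child
        have hcsafe : safe adj bn k c u = true := by
          have h := hall c (hL ▸ hcmem)
          rcases Bool.or_eq_true_iff.mp h with h1 | h1
          · exact absurd (by simpa using h1) hcp
          · exact h1
        rcases k with _ | j
        · rw [safe] at hcsafe; cases hcsafe
        -- the child's own adjacency list, for the step bound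
        rcases hq2 : PySem.List.pyGet? adj c with _ | l2
        · rw [safe, hq2] at hcsafe; cases hcsafe
        have hL2 : PySem.List.pyGetD adj c [] = l2 := pyGetD_eq_of_pyGet? adj c [] l2 hq2
        obtain ⟨mc, hmc, hrunc⟩ := ih j (by omega) (PySem.List.pyGetD adj c []) c u 0
          ((u, p, i+1) :: rest) total bcur hcsafe List.drop_zero.symm
        obtain ⟨mr, hmr, hrunr⟩ := ihc u p (i+1) rest
          (total + (dfsAF (j+1) c u bcur adj).1) (dfsAF (j+1) c u bcur adj).2 hsafe0 hdrop'
        refine ⟨1 + mc + mr, ?_, ?_⟩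
        · have hX : 0 < ((adj.map List.length).sum + 2) ^ (j+1) := Nat.pow_pos (by omega)
          have hlc : (PySem.List.pyGetD adj c []).length ≤ (adj.map List.length).sum := by
            rw [hL2]
            exact len_le_sum adj l2 (PySem.List.mem_of_pyGet?_eq_some _ hq2)
          have hmc2 : mc ≤ ((adj.map List.length).sum + 1) * ((adj.map List.length).sum + 2) ^ (j+1) :=
            le_trans hmc (Nat.mul_le_mul_right _ (by omega))
          have hpow : ((adj.map List.length).sum + 2) ^ (j+1+1)
              = ((adj.map List.length).sum + 2) ^ (j+1) * ((adj.map List.length).sum + 2) := pow_succ _ _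
          have h2 : (((c :: cs').length) + 1) * ((adj.map List.length).sum + 2) ^ (j+1+1)
              = (cs'.length + 1) * ((adj.map List.length).sum + 2) ^ (j+1+1)
                + ((adj.map List.length).sum + 2) ^ (j+1+1) := by
            simp only [List.length_cons]; ring
          nlinarith [hmr, hmc2, hX, hpow, h2]
        · intro g
          have h1 : 1 + mc + mr + g = (mc + (mr + g)) + 1 := by omega
          rw [h1, runB_succ, if_pos hlenL, hgetc, if_pos hcp]
          rw [hrunc (mr + g)]
          rw [← dfsAF_succ adj j c u bcur]
          rw [hrunr g]
          have hsplit : finProc adj (j+1) u p bcur (c :: cs')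
              = ((dfsAF (j+1) c u bcur adj).1 + (finProc adj (j+1) u p (dfsAF (j+1) c u bcur adj).2 cs').1,
                 (finProc adj (j+1) u p (dfsAF (j+1) c u bcur adj).2 cs').2) := by
            simp only [finProc, List.foldl_cons]
            rw [show stepA adj (j+1) u p (0, bcur) c
                = (0 + (dfsAF (j+1) c u bcur adj).1, (dfsAF (j+1) c u bcur adj).2) by simp [stepA, hcp]]
            rw [foldl_stepA_shift]
            simp only [Prod.mk.injEq]
            exact ⟨by ring, trivial⟩
          rw [hsplit]
          congr 1
          ring

-- ===== VERDICT (by name: the statement is the Claim_ definition above) =====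
theorem dfs_spec : Claim_equal_dfs := by
  intro node parent b adj hdom hpre
  obtain ⟨hpar, hsafe⟩ := hpre
  unfold Spec_dfs dfs dfs_alt
  obtain ⟨m, hm, hrun⟩ := sim adj b.length ((2 * adj.length + 1) * (2 * adj.length + 1))
    (PySem.List.pyGetD adj node []) node parent 0 [] 0 b hsafe List.drop_zero.symm
  rcases hq : PySem.List.pyGet? adj node with _ | l
  · rw [safe, hq] at hsafe; cases hsafe
  have hlnode : (PySem.List.pyGetD adj node []).length ≤ (adj.map List.length).sum := by
    rw [pyGetD_eq_of_pyGet? adj node [] l hq]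
    exact len_le_sum adj l (PySem.List.mem_of_pyGet?_eq_some _ hq)
  have hmF : m ≤ ((adj.map List.length).sum + 2) ^ ((2 * adj.length + 1) * (2 * adj.length + 1) + 2) := by
    calc m ≤ ((PySem.List.pyGetD adj node []).length + 1)
            * ((adj.map List.length).sum + 2) ^ ((2 * adj.length + 1) * (2 * adj.length + 1) + 1) := hm
      _ ≤ ((adj.map List.length).sum + 2)
            * ((adj.map List.length).sum + 2) ^ ((2 * adj.length + 1) * (2 * adj.length + 1) + 1) :=
          Nat.mul_le_mul_right _ (by omega)
      _ = ((adj.map List.length).sum + 2) ^ ((2 * adj.length + 1) * (2 * adj.length + 1) + 2) :=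
          (pow_succ' _ _).symm
  have hsplitF : ((adj.map List.length).sum + 2) ^ ((2 * adj.length + 1) * (2 * adj.length + 1) + 2)
      = m + (((adj.map List.length).sum + 2) ^ ((2 * adj.length + 1) * (2 * adj.length + 1) + 2) - m) := by
    omega
  rw [hsplitF, hrun, runB_nil]
  rw [dfsAF_succ]
  simp
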